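-- pv_equiv track=rewrite | github.com/SkastVnT/AI-Assistant | RAG Services/app/core/filters.py | group_by_document
-- ===== SOURCE A (Python) =====
-- from typing import List, Dict, Optional, Set
--
-- def group_by_document(results: List[Dict]) -> Dict[str, List[Dict]]:
--     """
--     Group results by source document
--
--     Args:
--         results: Search results
--
--     Returns:
--         Dict mapping document name to its results
--     """
--     grouped = {}
--
--     for r in results:
--         doc = r['metadata'].get('source', 'Unknown')
--         if doc not in grouped:
--             grouped[doc] = []
--         grouped[doc].append(r)
--
--     return grouped
-- ===== SOURCE B (Python) =====
-- def group_by_document(results):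
--     """Group results by source document: collect the distinct sources in
--     first-occurrence order, then build each group with one comprehension."""
--     def key(r):
--         return r['metadata'].get('source', 'Unknown')
--     order = list(dict.fromkeys(key(r) for r in results))
--     return {k: [r for r in results if key(r) == k] for k in order}
-- ===== Notes on version B (the rewrite author's own statement) =====
-- stated objective: alternative
-- what changed: Replaces the incremental membership-test-and-append dict-building loop by a two-phase scheme: dedup the source keys in first-occurrence order, then build each group with a filter comprehension over the input.
import Mathlib
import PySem

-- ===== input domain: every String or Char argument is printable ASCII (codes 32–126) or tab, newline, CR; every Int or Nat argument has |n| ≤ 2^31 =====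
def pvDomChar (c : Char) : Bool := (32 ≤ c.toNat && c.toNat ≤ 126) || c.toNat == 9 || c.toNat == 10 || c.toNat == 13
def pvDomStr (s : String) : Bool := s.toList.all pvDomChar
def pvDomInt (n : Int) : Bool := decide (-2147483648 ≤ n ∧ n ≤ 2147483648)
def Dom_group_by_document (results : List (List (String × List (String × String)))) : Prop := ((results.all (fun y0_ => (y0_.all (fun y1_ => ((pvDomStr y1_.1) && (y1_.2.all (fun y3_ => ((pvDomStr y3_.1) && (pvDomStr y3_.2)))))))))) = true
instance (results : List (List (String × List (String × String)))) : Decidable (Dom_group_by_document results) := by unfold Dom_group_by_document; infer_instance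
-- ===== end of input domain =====

-- B replaces A's incremental membership-test-and-append dict loop by "dedup the
-- source keys in first-occurrence order, then build each group by filtering";
-- objective: alternative decomposition (same results, not claimed faster).

-- shared helper: the grouping key r['metadata'].get('source', 'Unknown')
-- (r['metadata'] raises KeyError when missing — those inputs are outside Pre_;
-- the port reads that missing value as the default []).
def pvKey (r : List (String × List (String × String))) : String :=
  (PySem.Dict.mk ((PySem.Dict.mk r).getD "metadata" [])).getD "source" "Unknown"

-- ===== PORT A =====
-- grouped[doc].append(r) is ported as modify doc [] (· ++ [r]): under the
-- preceding 'if doc not in grouped' step the key is always present, so this is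
-- exactly the in-place append.
def group_by_document (results : List (List (String × List (String × String)))) : List (String × List (List (String × List (String × String)))) :=
  (results.foldl
    (fun grouped r =>
      let doc := pvKey r
      let grouped := if grouped.contains doc then grouped else grouped.insert doc []
      grouped.modify doc [] (· ++ [r]))
    PySem.Dict.empty).items

-- ===== PORT B =====
def group_by_document_alt (results : List (List (String × List (String × String)))) : List (String × List (List (String × List (String × String)))) :=
  (PySem.List.dedup (results.map pvKey)).map
    (fun k => (k, results.filter (fun r => pvKey r == k)))

-- ===== PRECONDITION & SPEC =====
-- Pre_ excludes exactly the inputs on which A raises KeyError: a result with no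
-- 'metadata' key (B raises there too).
def Pre_group_by_document (results : List (List (String × List (String × String)))) : Prop :=
  (results.all (fun r => r.any (fun p => p.1 == "metadata"))) = true
instance (results : List (List (String × List (String × String)))) : Decidable (Pre_group_by_document results) := by unfold Pre_group_by_document; infer_instance
def pvWitness_group_by_document : (List (List (String × List (String × String)))) :=
  [[("metadata", [("source", "a")])], [("metadata", [])]]
def Spec_group_by_document (results : List (List (String × List (String × String)))) (out : List (String × List (List (String × List (String × String))))) : Prop := out = group_by_document_alt results
instance (results : List (List (String × List (String × String)))) (out : List (String × List (List (String × List (String × String))))) : Decidable (Spec_group_by_document results out) := by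
  unfold Spec_group_by_document
  letI d1 : DecidableEq (List (String × List (String × String))) := inferInstance
  letI d2 : DecidableEq (List (List (String × List (String × String)))) := inferInstance
  letI d3 : DecidableEq (List (String × List (List (String × List (String × String))))) := inferInstance
  exact d3 out (group_by_document_alt results)

-- ===== CLAIM (what is proved, stated in full; the proofs are below) =====
def Claim_equal_group_by_document : Prop := ∀ (results : List (List (String × List (String × String)))), Dom_group_by_document results → Pre_group_by_document results → Spec_group_by_document results (group_by_document results)

-- ===== LEMMAS AND PROOFS =====

-- A's per-element step (conditional insert of [], then append) is the plain
-- 'modify with default []' step.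
theorem pv_step_eq (g : PySem.Dict String (List (List (String × List (String × String)))))
    (doc : String) (f : List (List (String × List (String × String))) → List (List (String × List (String × String)))) :
    (if g.contains doc then g else g.insert doc []).modify doc [] f = g.modify doc [] f := by
  by_cases h : g.contains doc = true
  · simp [h]
  · simp only [h, if_neg, Bool.not_eq_true]
    simp only [PySem.Dict.modify, PySem.Dict.getD_insert_self,
      PySem.Dict.insert_insert_self,
      PySem.Dict.getD_of_not_contains g [] (by simpa using h)]

theorem group_by_document_eq_foldl_modify (results : List (List (String × List (String × String)))) :
    group_by_document results =
      ((results.map (fun r => (pvKey r, r))).foldl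
        (fun d p => d.modify p.1 [] (· ++ [p.2])) PySem.Dict.empty).items := by
  unfold group_by_document
  rw [List.foldl_map]
  exact congrArg PySem.Dict.items
    (List.foldl_ext _ _ PySem.Dict.empty
      (fun g r _ => pv_step_eq g (pvKey r) (· ++ [r])))

-- ===== VERDICT (by name: the statement is the Claim_ definition above) =====
theorem group_by_document_spec : Claim_equal_group_by_document := by
  intro results _ _
  unfold Spec_group_by_document
  rw [group_by_document_eq_foldl_modify]
  have hkeys : ((results.map (fun r => (pvKey r, r))).foldl
      (fun d p => d.modify p.1 [] (· ++ [p.2])) PySem.Dict.empty).keys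
      = PySem.Set.ofList (results.map pvKey) := by
    rw [List.foldl_map]
    rw [PySem.Dict.keys_foldl_modify_key results pvKey [] (fun d r v => v ++ [r]) PySem.Dict.empty]
    rw [PySem.Dict.keys_empty, PySem.Set.update_nil_left]
  have hnodup : ((results.map (fun r => (pvKey r, r))).foldl
      (fun d p => d.modify p.1 [] (· ++ [p.2])) PySem.Dict.empty).keys.Nodup := by
    rw [List.foldl_map]
    exact PySem.Dict.nodup_keys_foldl_modify_key results pvKey [] _ PySem.Dict.empty
      (by rw [PySem.Dict.keys_empty]; exact List.nodup_nil)
  rw [PySem.Dict.items_eq_map_keys _ hnodup [], hkeys]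
  unfold group_by_document_alt
  rw [PySem.List.dedup_eq_ofList]
  apply List.map_congr_left
  intro k _
  rw [PySem.Dict.getD_foldl_modify_append]
  simp [List.filter_map, Function.comp_def]
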